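-- pv_equiv track=rewrite | github.com/gautampuneet/firefly-ai-assignment | src/essays/usecases/essays.py | aggregate_word_counts
-- ===== SOURCE A (Python) =====
-- from collections import Counter, defaultdict
-- from typing import Dict, List, Tuple, Set
--
-- def aggregate_word_counts(data: Dict, https_urls: List[str]) -> Dict:
--     # Create a default dictionary to hold total word counts
--     total_counts = defaultdict(int)
--
--     # Iterate through each URL's word dictionary
--     for url, word_counts in data.items():
--         if url not in https_urls:
--             continue
--         for word, count in word_counts.items():
--             total_counts[word] += count  # Aggregate counts
--     return total_counts
-- ===== SOURCE B (Python) =====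
-- def aggregate_word_counts(data, https_urls):
--     # Output-driven gather: pick the whitelisted rows, fix the word order once
--     # (first occurrence, via dict.fromkeys), then compute each word's total by
--     # summing its count over the rows. No running accumulator dict.
--     rows = [wc for url, wc in data.items() if url in https_urls]
--     words = list(dict.fromkeys(w for wc in rows for w in wc))
--     return {w: sum(wc.get(w, 0) for wc in rows) for w in words}
-- ===== Notes on version B (the rewrite author's own statement) =====
-- stated objective: alternative
-- what changed: Replaces A's guarded nested loops accumulating into a defaultdict by an output-driven gather: select the whitelisted rows, fix the distinct word order once with dict.fromkeys, then build each word's total as an independent sum over the rows (no running accumulator dict).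
import Mathlib
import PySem

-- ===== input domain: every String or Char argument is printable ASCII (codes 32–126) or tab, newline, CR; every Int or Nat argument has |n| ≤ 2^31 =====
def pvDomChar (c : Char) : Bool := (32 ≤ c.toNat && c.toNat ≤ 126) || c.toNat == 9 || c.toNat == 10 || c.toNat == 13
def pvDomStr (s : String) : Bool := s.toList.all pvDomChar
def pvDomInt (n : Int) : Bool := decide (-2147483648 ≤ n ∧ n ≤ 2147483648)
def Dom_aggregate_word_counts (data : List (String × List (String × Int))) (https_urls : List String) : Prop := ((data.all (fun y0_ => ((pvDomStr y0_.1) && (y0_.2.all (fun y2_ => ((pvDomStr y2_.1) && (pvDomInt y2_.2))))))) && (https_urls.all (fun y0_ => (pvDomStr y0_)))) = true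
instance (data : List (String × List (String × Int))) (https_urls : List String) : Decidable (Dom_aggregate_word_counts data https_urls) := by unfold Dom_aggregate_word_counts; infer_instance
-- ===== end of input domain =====

-- B answers the same question output-first: fix the distinct word order once, then sum each word's counts over the whitelisted rows — instead of A's running accumulator dict (objective: alternative decomposition, not speed). Pre_ states the Python dict invariant (unique keys in each inner dict).


-- ===== PORT A =====
-- for url, word_counts in data.items(): if url not in https_urls: continue
--   for word, count in word_counts.items(): total_counts[word] += count   (total_counts a defaultdict(int))
def aggregate_word_counts (data : List (String × List (String × Int))) (https_urls : List String) : List (String × Int) :=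
  (data.foldl
    (fun total_counts p =>
      if https_urls.contains p.1 then
        p.2.foldl (fun tc q => tc.modify q.1 0 (· + q.2)) total_counts
      else total_counts)
    PySem.Dict.empty).items

-- ===== PORT B =====
-- rows = [wc for url, wc in data.items() if url in https_urls]
-- words = list(dict.fromkeys(w for wc in rows for w in wc))
-- return {w: sum(wc.get(w, 0) for wc in rows) for w in words}
def aggregate_word_counts_alt (data : List (String × List (String × Int))) (https_urls : List String) : List (String × Int) :=
  let rows := (data.filter (fun p => https_urls.contains p.1)).map (·.2)
  let words := PySem.List.dedup (rows.flatMap (fun wc => wc.map (·.1)))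
  words.map (fun w => (w, (rows.map (fun wc => (PySem.Dict.mk wc).getD w 0)).sum))

-- ===== PRECONDITION & SPEC =====
-- Pre_ excludes association lists with a duplicate key inside an inner word-count dict:
-- Python dicts have unique keys, so such inputs cannot arise from the Python programs' domain
-- (there A sums every duplicate pair while B's dict .get reads the first match).
def Pre_aggregate_word_counts (data : List (String × List (String × Int))) (https_urls : List String) : Prop :=
  ∀ p ∈ data, (p.2.map (·.1)).Nodup
instance (data : List (String × List (String × Int))) (https_urls : List String) : Decidable (Pre_aggregate_word_counts data https_urls) := by unfold Pre_aggregate_word_counts; infer_instance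
def pvWitness_aggregate_word_counts : (List (String × List (String × Int))) × List String :=
  ([("https://a", [("w", 2), ("x", 1)]), ("http://b", [("w", 5)])], ["https://a"])
def Spec_aggregate_word_counts (data : List (String × List (String × Int))) (https_urls : List String) (out : List (String × Int)) : Prop := out = aggregate_word_counts_alt data https_urls
instance (data : List (String × List (String × Int))) (https_urls : List String) (out : List (String × Int)) : Decidable (Spec_aggregate_word_counts data https_urls out) := by unfold Spec_aggregate_word_counts; infer_instance

-- ===== CLAIM (what is proved, stated in full; the proofs are below) =====
def Claim_equal_aggregate_word_counts : Prop := ∀ (data : List (String × List (String × Int))) (https_urls : List String), Dom_aggregate_word_counts data https_urls → Pre_aggregate_word_counts data https_urls → Spec_aggregate_word_counts data https_urls (aggregate_word_counts data https_urls)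

-- ===== LEMMAS AND PROOFS =====

-- A's guarded nested fold is the fold over the flattening of the whitelisted rows
theorem pv_fold_flatten (data : List (String × List (String × Int))) (pred : String × List (String × Int) → Bool)
    (step : PySem.Dict String Int → String × Int → PySem.Dict String Int) (d : PySem.Dict String Int) :
    data.foldl (fun tc p => if pred p then p.2.foldl step tc else tc) d
      = (((data.filter pred).map (·.2)).flatMap id).foldl step d := by
  induction data generalizing d with
  | nil => rfl
  | cons hd tl ih =>
      simp only [List.foldl_cons, List.filter_cons]
      by_cases h : pred hd
      · simp [h, List.foldl_append, ih]
      · simp [h, ih]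

-- running defaultdict totals, read back per key
theorem pv_getD_fold_modify (ps : List (String × Int)) (d : PySem.Dict String Int) (w : String) :
    (ps.foldl (fun tc q => tc.modify q.1 0 (· + q.2)) d).getD w 0
      = d.getD w 0 + ((ps.filter (fun q => q.1 == w)).map (·.2)).sum := by
  induction ps generalizing d with
  | nil => simp
  | cons q t ih =>
      simp only [List.foldl_cons, List.filter_cons, ih, PySem.Dict.getD_modify]
      by_cases h : w = q.1
      · simp [h]
        ring
      · simp [h, Ne.symm h]

-- one dict lookup on an inner dict with unique keys = sum of its matching pairs
theorem pv_getD_mk_eq_sum (wc : List (String × Int)) (w : String) (h : (wc.map (·.1)).Nodup) :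
    (PySem.Dict.mk wc).getD w 0 = ((wc.filter (fun q => q.1 == w)).map (·.2)).sum := by
  induction wc with
  | nil => simp [PySem.Dict.getD_eq_get?_getD, PySem.Dict.get?]
  | cons q t ih =>
      simp only [List.map_cons, List.nodup_cons] at h
      have hstep : (PySem.Dict.mk (q :: t)).getD w 0
          = if q.1 == w then q.2 else (PySem.Dict.mk t).getD w 0 := by
        obtain ⟨k, v⟩ := q
        simp only [PySem.Dict.getD_eq_get?_getD, PySem.Dict.get?_mk_cons]
        split <;> simp_all
      simp only [List.filter_cons, hstep]
      by_cases hq : q.1 = w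
      · have ht : t.filter (fun q => q.1 == w) = [] := by
          apply List.filter_eq_nil_iff.mpr
          intro x hx hb
          exact h.1 (by subst hq; rw [← (by simpa using hb : x.1 = q.1)]; exact List.mem_map_of_mem hx)
        simp [hq, ht]
      · simpa [hq] using ih h.2

-- ===== VERDICT (by name: the statement is the Claim_ definition above) =====
theorem aggregate_word_counts_spec : Claim_equal_aggregate_word_counts := by
  intro data https_urls _ hpre
  unfold Spec_aggregate_word_counts aggregate_word_counts aggregate_word_counts_alt
  rw [pv_fold_flatten]
  set rows := (data.filter (fun p => https_urls.contains p.1)).map (·.2) with hrows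
  have hrowsnd : ∀ wc ∈ rows, (wc.map (·.1)).Nodup := by
    intro wc hwc
    rw [hrows] at hwc
    obtain ⟨p, hp, rfl⟩ := List.mem_map.mp hwc
    exact hpre p (List.mem_of_mem_filter hp)
  set ps := rows.flatMap id with hps
  have hnd : ((ps.foldl (fun tc q => tc.modify q.1 0 (· + q.2)) PySem.Dict.empty)).keys.Nodup :=
    PySem.Dict.nodup_keys_foldl_modify_key ps (·.1) 0 (fun tc q => (· + q.2)) _ PySem.Dict.nodup_keys_empty
  rw [PySem.Dict.items_eq_map_keys _ hnd 0]
  have hkeys : ((ps.foldl (fun tc q => tc.modify q.1 0 (· + q.2)) PySem.Dict.empty)).keys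
      = PySem.List.dedup (rows.flatMap (fun wc => wc.map (·.1))) := by
    rw [PySem.Dict.keys_foldl_modify_key]
    simp [PySem.List.dedup_eq_ofList, PySem.Set.update, PySem.Set.ofList_eq_foldl, hps,
      List.flatMap_def]
  rw [hkeys]
  apply List.map_congr_left
  intro w _
  rw [pv_getD_fold_modify]
  simp only [PySem.Dict.getD_empty, zero_add, Prod.mk.injEq, true_and]
  rw [hps, List.flatMap_id]
  rw [List.filter_flatten, List.map_flatten, List.sum_flatten]
  congr 1
  simp only [List.map_map]
  apply List.map_congr_left
  intro wc hwc
  exact (pv_getD_mk_eq_sum wc w (hrowsnd wc hwc)).symm
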